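-- pv_equiv track=rewrite | github.com/andresdigi25/address-standarization-poc | record-linkage.py | extract_address_components
-- ===== SOURCE A (Python) =====
-- def extract_address_components(address):
--     """
--     Extract components from address string for weighted matching.
--
--     Args:
--         address (str): Normalized address string
--
--     Returns:
--         dict: Components of the address
--     """
--     components = {
--         'house_number': None,
--         'street_name': None,
--         'unit': None,
--         'city': None,
--         'zipcode': None
--     }
--
--     # Basic extraction - in a production system, you would use a more sophisticated
--     # address parser like libpostal or a regex-based approach
--
--     # Split address on whitespace
--     parts = address.split()
--
--     # Try to extract house number (usually first numeric part)
--     for part in parts: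
--         if part.isdigit():
--             components['house_number'] = part
--             break
--
--     # Try to extract zip code (5-digit number, typically at the end)
--     for part in parts:
--         if part.isdigit() and len(part) == 5:
--             components['zipcode'] = part
--
--     # Look for common unit identifiers
--     for i, part in enumerate(parts):
--         if part in ['apt', 'unit', 'ste', 'suite', '#']:
--             if i+1 < len(parts):
--                 components['unit'] = parts[i+1]
--
--     return components
-- ===== SOURCE B (Python) =====
-- def extract_address_components(address):
--     """Single state-carrying pass over the tokens instead of three separate scans."""
--     house = zipc = unit = None
--     pending = False
--     for tok in address.split():
--         if pending:
--             unit = tok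
--         if house is None and tok.isdigit():
--             house = tok
--         if tok.isdigit() and len(tok) == 5:
--             zipc = tok
--         pending = tok in ('apt', 'unit', 'ste', 'suite', '#')
--     return {
--         'house_number': house,
--         'street_name': None,
--         'unit': unit,
--         'city': None,
--         'zipcode': zipc
--     }
-- ===== Notes on version B (the rewrite author's own statement) =====
-- stated objective: alternative
-- what changed: Replaced three separate scans over the tokens (break-loop for the first digit house number, full scan for the last 5-digit zipcode, enumerate+indexing scan for the unit) by one single state-carrying pass with a 'previous token was a unit identifier' flag, with no indexing at all.
import Mathlib
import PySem

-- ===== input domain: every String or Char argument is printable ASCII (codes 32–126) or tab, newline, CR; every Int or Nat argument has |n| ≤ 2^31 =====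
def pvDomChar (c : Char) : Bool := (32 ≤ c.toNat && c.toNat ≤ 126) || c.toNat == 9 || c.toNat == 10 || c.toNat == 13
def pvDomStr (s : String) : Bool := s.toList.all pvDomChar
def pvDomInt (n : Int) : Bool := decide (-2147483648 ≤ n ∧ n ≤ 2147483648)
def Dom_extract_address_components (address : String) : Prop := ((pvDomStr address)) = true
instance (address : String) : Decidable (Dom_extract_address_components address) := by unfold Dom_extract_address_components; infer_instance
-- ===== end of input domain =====

-- one honest line: B fuses A's three token scans into a single state-carrying pass (flag for "previous token was a unit identifier"); same O(n) cost, different traversal.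

-- ===== PORT A =====
-- the unit-identifier list ['apt', 'unit', 'ste', 'suite', '#']
def pvIds : List String := ["apt", "unit", "ste", "suite", "#"]

-- A's first loop: first all-digit token, with break
def pvA_house : List String → Option String
  | [] => none
  | p :: ps => if PySem.Str.strIsdigit p then some p else pvA_house ps

-- A's second loop: last 5-digit all-digit token
def pvA_zip (parts : List String) : Option String :=
  parts.foldl (fun z p => if PySem.Str.strIsdigit p && PySem.Str.len p == 5 then some p else z) none

-- A's third loop: for i, part in enumerate(parts): if identifier and i+1 < len, unit = parts[i+1]
def pvA_unit (parts : List String) : Option String :=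
  (PySem.List.enumerate parts).foldl
    (fun u ip =>
      if ip.2 ∈ pvIds then
        (if ip.1 + 1 < PySem.List.len parts then some (PySem.List.pyGetD parts (ip.1 + 1) "") else u)
      else u)
    none

def extract_address_components (address : String) : List (String × Option String) :=
  let parts := PySem.Str.split₀ address
  [("house_number", pvA_house parts), ("street_name", none),
   ("unit", pvA_unit parts), ("city", none), ("zipcode", pvA_zip parts)]

-- ===== PORT B =====
-- state: (house, zipcode, unit, previous-token-was-identifier flag)
def pvB_step (st : Option String × Option String × Option String × Bool) (tok : String) :
    Option String × Option String × Option String × Bool :=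
  let u := if st.2.2.2 then some tok else st.2.2.1
  let h := if st.1.isNone && PySem.Str.strIsdigit tok then some tok else st.1
  let z := if PySem.Str.strIsdigit tok && PySem.Str.len tok == 5 then some tok else st.2.1
  (h, z, u, decide (tok ∈ pvIds))

def extract_address_components_alt (address : String) : List (String × Option String) :=
  let st := (PySem.Str.split₀ address).foldl pvB_step (none, none, none, false)
  [("house_number", st.1), ("street_name", none),
   ("unit", st.2.2.1), ("city", none), ("zipcode", st.2.1)]

-- ===== PRECONDITION & SPEC =====
def Spec_extract_address_components (address : String) (out : List (String × Option String)) : Prop := out = extract_address_components_alt address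
instance (address : String) (out : List (String × Option String)) : Decidable (Spec_extract_address_components address out) := by unfold Spec_extract_address_components; infer_instance

-- ===== CLAIM (what is proved, stated in full; the proofs are below) =====
def Claim_equal_extract_address_components : Prop := ∀ (address : String), Dom_extract_address_components address → Spec_extract_address_components address (extract_address_components address)

-- ===== LEMMAS AND PROOFS =====

-- flag-style unit recursion (B's unit component, tokens only)
def pvUB (u : Option String) (f : Bool) : List String → Option String
  | [] => u
  | p :: l => pvUB (if f then some p else u) (p ∈ pvIds) l

-- pairwise unit recursion (A's unit loop re-expressed without indices)
def pvUA (u : Option String) : List String → Option String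
  | [] => u
  | [_] => u
  | p :: q :: rest => pvUA (if p ∈ pvIds then some q else u) (q :: rest)

theorem pvB_fold_house (l : List String) : ∀ (h z u : Option String) (f : Bool),
    (l.foldl pvB_step (h, z, u, f)).1 = (if h.isSome then h else pvA_house l) := by
  induction l with
  | nil => intro h z u f; cases h <;> simp [pvA_house]
  | cons p l ih =>
    intro h z u f
    cases h with
    | none => simp only [List.foldl_cons, pvB_step, ih, pvA_house]; split_ifs <;> simp_all
    | some x => simp only [List.foldl_cons, pvB_step, ih, pvA_house]; simp

theorem pvB_fold_zip (l : List String) : ∀ (h z u : Option String) (f : Bool),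
    (l.foldl pvB_step (h, z, u, f)).2.1 =
      l.foldl (fun z p => if PySem.Str.strIsdigit p && PySem.Str.len p == 5 then some p else z) z := by
  induction l with
  | nil => intro h z u f; rfl
  | cons p l ih => intro h z u f; simp only [List.foldl_cons, pvB_step, ih]

theorem pvB_fold_unit (l : List String) : ∀ (h z u : Option String) (f : Bool),
    (l.foldl pvB_step (h, z, u, f)).2.2.1 = pvUB u f l := by
  induction l with
  | nil => intro h z u f; rfl
  | cons p l ih => intro h z u f; simp only [List.foldl_cons, pvB_step, ih]; rfl

theorem pvUB_eq_pvUA (l : List String) : ∀ u : Option String, pvUB u false l = pvUA u l := by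
  induction l with
  | nil => intro u; rfl
  | cons p l ih =>
    intro u
    cases l with
    | nil => rfl
    | cons q rest =>
      have h2 : pvUB u false (p :: q :: rest)
          = pvUB (if p ∈ pvIds then some q else u) false (q :: rest) := by
        by_cases hp : p ∈ pvIds <;> simp [pvUB, hp]
      rw [h2, ih, pvUA]

theorem pvA_unit_gen (parts : List String) (l : List String) : ∀ (k : Nat) (u : Option String),
    parts.drop k = l →
    (PySem.List.enumerate l (k : Int)).foldl
      (fun u ip =>
        if ip.2 ∈ pvIds then
          (if ip.1 + 1 < PySem.List.len parts then some (PySem.List.pyGetD parts (ip.1 + 1) "") else u)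
        else u)
      u = pvUA u l := by
  induction l with
  | nil => intro k u _; rfl
  | cons p l ih =>
    intro k u hdrop
    have hk : k < parts.length := by
      by_contra hge
      simp [List.drop_eq_nil_of_le (Nat.le_of_not_lt hge)] at hdrop
    have hdrop' : parts.drop (k + 1) = l := by
      have := congrArg (List.drop 1) hdrop
      simpa [List.drop_drop, Nat.add_comm] using this
    rw [PySem.List.enumerate_cons, List.foldl_cons]
    cases l with
    | nil =>
      have hlen : ¬ ((k : Int) + 1 < PySem.List.len parts) := by
        have : parts.length ≤ k + 1 := by
          by_contra hlt
          have : parts.drop (k+1) ≠ [] := by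
            simp [List.drop_eq_nil_iff]; omega
          exact this hdrop'
        simp [PySem.List.len_eq]; exact_mod_cast this
      simp only [hlen, if_false, ite_self]
      rfl
    | cons q rest =>
      have hk1 : k + 1 < parts.length := by
        by_contra hge
        simp [List.drop_eq_nil_of_le (Nat.le_of_not_lt hge)] at hdrop'
      have hget : parts.getD (k+1) "" = q := by
        have h0 : parts[k+1]? = some q := by
          have := congrArg (fun t => t[0]?) hdrop'
          simpa [List.getElem?_drop] using this
        simp [List.getD, h0]
      have hlen : ((k : Int) + 1 < PySem.List.len parts) := by
        simp [PySem.List.len_eq]; exact_mod_cast hk1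
      have hgetD : PySem.List.pyGetD parts ((k : Int) + 1) "" = q := by
        have : ((k : Int) + 1) = ((k + 1 : Nat) : Int) := by push_cast; ring
        rw [this, PySem.List.pyGetD_natCast]; exact hget
      have step := ih (k + 1) (if p ∈ pvIds then some q else u) hdrop'
      push_cast at step
      simp only [hlen, if_true, hgetD]
      rw [pvUA]
      exact step

theorem pvA_unit_eq (parts : List String) : pvA_unit parts = pvUA none parts := by
  unfold pvA_unit
  have := pvA_unit_gen parts parts 0 none (by simp)
  simpa using this

-- ===== VERDICT (by name: the statement is the Claim_ definition above) =====
theorem extract_address_components_spec : Claim_equal_extract_address_components := by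
  intro address _
  unfold Spec_extract_address_components extract_address_components extract_address_components_alt
  simp only [pvB_fold_house, pvB_fold_zip, pvB_fold_unit, Option.isSome_none,
    pvUB_eq_pvUA, pvA_unit_eq]
  rfl
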